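-- pv_equiv track=rewrite | github.com/Alirezaja1384/micro-notif | micro_notif/micro_notif/utils.py | mask_str
-- ===== SOURCE A (Python) =====
-- def mask_str(
--     val: str,
--     mask_char: str = "*",
--     from_index: int | None = None,
--     to_index: int | None = None,
-- ) -> str:
--     from_index = from_index or 0
--     to_index = to_index or len(val) - 1
--
--     return "".join(
--         [
--             mask_char if i in range(from_index, to_index + 1) else c
--             for i, c in enumerate(val)
--         ]
--     )
-- ===== SOURCE B (Python) =====
-- def mask_str(
--     val: str,
--     mask_char: str = "*",
--     from_index: int | None = None,
--     to_index: int | None = None,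
-- ) -> str:
--     from_index = from_index or 0
--     to_index = to_index or len(val) - 1
--
--     start = max(from_index, 0)
--     end = min(to_index, len(val) - 1)
--     if start > end:
--         return val
--     return val[:start] + mask_char * (end - start + 1) + val[end + 1:]
-- ===== Notes on version B (the rewrite author's own statement) =====
-- stated objective: faster
-- what changed: Replaces the per-character enumerate/range-membership list comprehension and join with clamped bounds and three slice/repeat concatenations that build the result in bulk.
import Mathlib
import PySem

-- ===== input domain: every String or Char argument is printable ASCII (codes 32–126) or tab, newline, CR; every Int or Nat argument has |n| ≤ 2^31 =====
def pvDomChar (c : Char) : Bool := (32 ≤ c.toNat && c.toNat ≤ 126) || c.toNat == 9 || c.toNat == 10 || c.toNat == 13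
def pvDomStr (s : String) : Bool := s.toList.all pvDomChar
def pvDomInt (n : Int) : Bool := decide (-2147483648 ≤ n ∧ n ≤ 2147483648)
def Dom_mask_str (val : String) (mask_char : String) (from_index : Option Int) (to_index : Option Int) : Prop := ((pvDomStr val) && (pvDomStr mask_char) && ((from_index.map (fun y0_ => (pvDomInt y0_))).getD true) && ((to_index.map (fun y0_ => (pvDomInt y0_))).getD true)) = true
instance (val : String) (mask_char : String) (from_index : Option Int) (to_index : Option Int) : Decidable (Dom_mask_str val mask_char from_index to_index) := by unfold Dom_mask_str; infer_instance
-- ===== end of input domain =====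

-- B masks the range with clamped bounds and three slice/repeat concatenations instead of
-- A's per-character enumerate + range-membership comprehension (objective: faster, constant factor).

-- ===== PORT A =====
-- `x or d` on possibly-None ints: falsy (none / 0) picks the default, otherwise the value.
def pyOrDefault (x : Option Int) (d : Int) : Int :=
  match x with
  | none => d
  | some n => if n = 0 then d else n

-- `i in range(from_index, to_index + 1)` is the step-1 range-membership test; it is ported
-- as its exact contract fi ≤ i ∧ i < ti + 1 (PySem.List.mem_pyRange_one) instead of
-- materialising the range list (CPython's range membership is O(1) too).
def mask_str (val : String) (mask_char : String) (from_index : Option Int) (to_index : Option Int) : String :=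
  let fi : Int := pyOrDefault from_index 0
  let ti : Int := pyOrDefault to_index (PySem.Str.len val - 1)
  PySem.Str.join "" ((PySem.List.enumerate val.toList 0).map
    (fun p => if fi ≤ p.1 ∧ p.1 < ti + 1 then mask_char else String.ofList [p.2]))

-- ===== PORT B =====
-- val[:start], val[end+1:] with 0 ≤ start, 0 ≤ end+1 and string concatenation are ported
-- exactly via PySem.List.slice on the code points; mask_char * n via PySem.List.pyRepeat.
def mask_str_alt (val : String) (mask_char : String) (from_index : Option Int) (to_index : Option Int) : String :=
  let fi : Int := pyOrDefault from_index 0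
  let ti : Int := pyOrDefault to_index (PySem.Str.len val - 1)
  let start : Int := max fi 0
  let stop : Int := min ti (PySem.Str.len val - 1)
  if start > stop then val
  else String.ofList (PySem.List.slice val.toList none (some start)
        ++ PySem.List.pyRepeat mask_char.toList (stop - start + 1)
        ++ PySem.List.slice val.toList (some (stop + 1)) none)

-- ===== PRECONDITION & SPEC =====
def Spec_mask_str (val : String) (mask_char : String) (from_index : Option Int) (to_index : Option Int) (out : String) : Prop := out = mask_str_alt val mask_char from_index to_index
instance (val : String) (mask_char : String) (from_index : Option Int) (to_index : Option Int) (out : String) : Decidable (Spec_mask_str val mask_char from_index to_index out) := by unfold Spec_mask_str; infer_instance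

-- ===== CLAIM (what is proved, stated in full; the proofs are below) =====
def Claim_equal_mask_str : Prop := ∀ (val : String) (mask_char : String) (from_index : Option Int) (to_index : Option Int), Dom_mask_str val mask_char from_index to_index → Spec_mask_str val mask_char from_index to_index (mask_str val mask_char from_index to_index)

-- ===== LEMMAS AND PROOFS =====

-- A's comprehension on the list of code points, generalized over the enumerate start index.
def pvSeg (mc : List Char) (fi ti : Int) (l : List Char) (s : Int) : List Char :=
  ((PySem.List.enumerate l s).map
    (fun p => if fi ≤ p.1 ∧ p.1 < ti + 1 then mc else [p.2])).flatten

theorem pvSeg_nil (mc : List Char) (fi ti s : Int) : pvSeg mc fi ti [] s = [] := by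
  simp [pvSeg, PySem.List.enumerate_nil]

theorem pvSeg_cons (mc : List Char) (fi ti : Int) (c : Char) (l : List Char) (s : Int) :
    pvSeg mc fi ti (c :: l) s =
      (if fi ≤ s ∧ s < ti + 1 then mc else [c]) ++ pvSeg mc fi ti l (s + 1) := by
  simp [pvSeg, PySem.List.enumerate_cons]

theorem pvSeg_append (mc : List Char) (fi ti : Int) (l₁ l₂ : List Char) (s : Int) :
    pvSeg mc fi ti (l₁ ++ l₂) s =
      pvSeg mc fi ti l₁ s ++ pvSeg mc fi ti l₂ (s + l₁.length) := by
  simp [pvSeg, PySem.List.enumerate_append]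

theorem pvSeg_unmasked (mc : List Char) (fi ti : Int) (l : List Char) (s : Int)
    (h : ∀ k : Nat, k < l.length → ¬ (fi ≤ s + k ∧ s + k < ti + 1)) :
    pvSeg mc fi ti l s = l := by
  induction l generalizing s with
  | nil => exact pvSeg_nil mc fi ti s
  | cons c l ih =>
    rw [pvSeg_cons, if_neg (by have := h 0 (by simp); simpa using this)]
    rw [ih (s + 1) (fun k hk => by
      have := h (k + 1) (by simpa using Nat.succ_lt_succ hk)
      push_cast at this ⊢; omega)]
    rfl

theorem pvSeg_masked (mc : List Char) (fi ti : Int) (l : List Char) (s : Int)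
    (h : ∀ k : Nat, k < l.length → (fi ≤ s + k ∧ s + k < ti + 1)) :
    pvSeg mc fi ti l s = (List.replicate l.length mc).flatten := by
  induction l generalizing s with
  | nil => exact pvSeg_nil mc fi ti s
  | cons c l ih =>
    rw [pvSeg_cons, if_pos (by have := h 0 (by simp); simpa using this)]
    rw [ih (s + 1) (fun k hk => by
      have := h (k + 1) (by simpa using Nat.succ_lt_succ hk)
      push_cast at this ⊢; omega)]
    simp [List.replicate_succ]

theorem pvFlattenIntersperseNil {α : Type} (l : List (List α)) :
    (List.intersperse ([] : List α) l).flatten = l.flatten := by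
  induction l with
  | nil => rfl
  | cons a t ih =>
    cases t with
    | nil => rfl
    | cons b t' =>
      have h : List.intersperse ([] : List α) (a :: b :: t') =
          a :: [] :: List.intersperse ([] : List α) (b :: t') := rfl
      rw [h, List.flatten_cons, List.flatten_cons, ih]
      simp

-- A's join over the enumerate comprehension is pvSeg on the code points.
theorem mask_str_toList (val mask_char : String) (fi ti : Int) :
    (PySem.Str.join "" ((PySem.List.enumerate val.toList 0).map
      (fun p => if fi ≤ p.1 ∧ p.1 < ti + 1 then mask_char else String.ofList [p.2]))).toList
      = pvSeg mask_char.toList fi ti val.toList 0 := by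
  rw [PySem.Str.toList_join, pvSeg]
  have h0 : "".toList = ([] : List Char) := rfl
  rw [h0, PySem.Chars.join, List.intercalate, pvFlattenIntersperseNil, List.map_map]
  refine congrArg List.flatten (List.map_congr_left ?_)
  intro p _
  by_cases h : fi ≤ p.1 ∧ p.1 < ti + 1
  · rw [Function.comp_apply, if_pos h, if_pos h]
  · rw [Function.comp_apply, if_neg h, if_neg h, String.toList_ofList]

-- the central equality, for arbitrary fi ti (both ports compute them identically)
theorem pvKey (val mask_char : String) (fi ti : Int) :
    PySem.Str.join "" ((PySem.List.enumerate val.toList 0).map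
      (fun p => if fi ≤ p.1 ∧ p.1 < ti + 1 then mask_char else String.ofList [p.2]))
    = (if max fi 0 > min ti (PySem.Str.len val - 1) then val
       else String.ofList (PySem.List.slice val.toList none (some (max fi 0))
            ++ PySem.List.pyRepeat mask_char.toList (min ti (PySem.Str.len val - 1) - max fi 0 + 1)
            ++ PySem.List.slice val.toList (some (min ti (PySem.Str.len val - 1) + 1)) none)) := by
  apply String.toList_injective
  rw [mask_str_toList]
  set L := val.toList with hL
  have hlen : PySem.Str.len val = (L.length : Int) := PySem.Str.len_eq val
  by_cases hc : max fi 0 > min ti (PySem.Str.len val - 1)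
  · rw [if_pos hc]
    apply pvSeg_unmasked
    intro k hk
    rw [hlen] at hc
    omega
  · rw [if_neg hc]
    rw [hlen] at hc
    set start : Int := max fi 0 with hs
    set stop : Int := min ti (PySem.Str.len val - 1) with hp
    have hstop : stop = min ti ((L.length : Int) - 1) := by rw [hp, hlen]
    have h0s : 0 ≤ start := le_max_right _ _
    have hse : start ≤ stop := by omega
    have h0p : 0 ≤ stop := le_trans h0s hse
    have hplen : stop ≤ (L.length : Int) - 1 := by rw [hstop]; exact min_le_right _ _
    set sN : Nat := start.toNat with hsN
    set eN : Nat := stop.toNat with heN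
    have hsI : (sN : Int) = start := Int.toNat_of_nonneg h0s
    have heI : (eN : Int) = stop := Int.toNat_of_nonneg h0p
    -- decompose L into the three segments
    have hdec : L = L.take sN ++ (L.drop sN).take (eN + 1 - sN) ++ L.drop (eN + 1) := by
      rw [List.append_assoc]
      conv_lhs => rw [← List.take_append_drop sN L]
      congr 1
      conv_lhs => rw [← List.take_append_drop (eN + 1 - sN) (L.drop sN)]
      congr 1
      rw [List.drop_drop]
      congr 1
      omega
    have hlen1 : (L.take sN).length = sN := by
      rw [List.length_take]; omega
    have hlen2 : ((L.drop sN).take (eN + 1 - sN)).length = eN + 1 - sN := by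
      rw [List.length_take, List.length_drop]; omega
    conv_lhs => rw [hdec]
    rw [pvSeg_append, pvSeg_append, List.length_append, hlen1, hlen2]
    rw [pvSeg_unmasked _ _ _ _ _ (fun k hk => by
      rw [hlen1] at hk
      omega)]
    rw [pvSeg_masked _ _ _ _ _ (fun k hk => by
      rw [hlen2] at hk
      omega)]
    rw [pvSeg_unmasked _ _ _ _ _ (fun k hk => by
      rw [List.length_drop] at hk
      push_cast
      omega)]
    rw [hlen2]
    -- now the B side
    rw [PySem.List.slice_to L h0s, PySem.List.slice_from L (by omega : (0:Int) ≤ stop + 1)]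
    simp only [PySem.List.pyRepeat]
    have h1 : (stop + 1).toNat = eN + 1 := by omega
    have h2 : (stop - start + 1).toNat = eN + 1 - sN := by omega
    rw [h1, h2]
    simp [String.toList_ofList]
    all_goals omega

-- ===== VERDICT (by name: the statement is the Claim_ definition above) =====
theorem mask_str_spec : Claim_equal_mask_str := by
  intro val mask_char from_index to_index _
  show mask_str val mask_char from_index to_index = mask_str_alt val mask_char from_index to_index
  unfold mask_str mask_str_alt
  exact pvKey val mask_char (pyOrDefault from_index 0)
    (pyOrDefault to_index (PySem.Str.len val - 1))
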